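-- pv_equiv track=rewrite | github.com/KaranJadhav0027/LB_Python | p629.py | occuranceDigit
-- ===== SOURCE A (Python) =====
-- def occuranceDigit(No):
--     count4=0
--     count5=0
--     count7=0
--     Digit=0
--
--     while(No!=0):
--         Digit=No%10
--         if(Digit==4  ):
--             count4=count4+1
--         elif(Digit==5):
--             count5=count5+1
--         elif(Digit==7):
--             count7=count7+1
--         No=No//10
--
--     return count4,count5,count7
-- ===== SOURCE B (Python) =====
-- def occuranceDigit(No):
--     freq = {}
--     for ch in str(No):
--         freq[ch] = freq.get(ch, 0) + 1
--     return freq.get('4', 0), freq.get('5', 0), freq.get('7', 0)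
-- ===== Notes on version B (the rewrite author's own statement) =====
-- stated objective: idiomatic
-- what changed: B converts the number to its decimal string once and builds a character-frequency dict over it, then reads off the counts of '4','5','7', instead of A's arithmetic digit-extraction loop with three branch-updated counters.
-- outside the precondition, e.g. on occuranceDigit(-47): A does not finish within the time limit, B returns (1, 0, 1)
import Mathlib
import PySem

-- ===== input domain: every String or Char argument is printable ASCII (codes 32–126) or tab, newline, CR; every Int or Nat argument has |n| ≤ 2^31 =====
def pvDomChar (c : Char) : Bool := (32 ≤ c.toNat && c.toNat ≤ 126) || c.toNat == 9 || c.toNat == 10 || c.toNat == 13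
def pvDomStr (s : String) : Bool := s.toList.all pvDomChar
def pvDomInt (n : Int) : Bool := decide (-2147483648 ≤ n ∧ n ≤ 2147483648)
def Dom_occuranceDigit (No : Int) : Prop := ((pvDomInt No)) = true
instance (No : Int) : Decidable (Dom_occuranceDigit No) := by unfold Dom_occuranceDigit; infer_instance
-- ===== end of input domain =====

-- B replaces A's arithmetic digit-extraction loop with a character-frequency dict built over str(No) (idiomatic; no speed claim).

-- ===== PORT A =====
-- the while loop of A; for No < 0 Python's loop never terminates (excluded by Pre_), the port returns the current state there
def occuranceDigitLoop (No c4 c5 c7 : Int) : Int × Int × Int :=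
  if No = 0 then (c4, c5, c7)
  else if 0 < No then
    let Digit := PySem.Int.mod No 10
    if Digit = 4 then occuranceDigitLoop (PySem.Int.floordiv No 10) (c4 + 1) c5 c7
    else if Digit = 5 then occuranceDigitLoop (PySem.Int.floordiv No 10) c4 (c5 + 1) c7
    else if Digit = 7 then occuranceDigitLoop (PySem.Int.floordiv No 10) c4 c5 (c7 + 1)
    else occuranceDigitLoop (PySem.Int.floordiv No 10) c4 c5 c7
  else (c4, c5, c7)
termination_by No.toNat
decreasing_by
  all_goals rw [PySem.Int.floordiv_eq_ediv_of_pos (by norm_num)]; omega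

def occuranceDigit (No : Int) : Int × Int × Int :=
  occuranceDigitLoop No 0 0 0

-- ===== PORT B =====
def occuranceDigit_alt (No : Int) : Int × Int × Int :=
  let freq := (PySem.Int.toStr No).toList.foldl
    (fun d ch => d.insert ch (d.getD ch 0 + 1)) (PySem.Dict.empty : PySem.Dict Char Int)
  (freq.getD '4' 0, freq.getD '5' 0, freq.getD '7' 0)

-- ===== PRECONDITION & SPEC =====
-- Pre_ excludes exactly No < 0, on which A's while loop never terminates (Python diverges there).
def Pre_occuranceDigit (No : Int) : Prop := 0 ≤ No
instance (No : Int) : Decidable (Pre_occuranceDigit No) := by unfold Pre_occuranceDigit; infer_instance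
def pvWitness_occuranceDigit : Int := 457

def Spec_occuranceDigit (No : Int) (out : Int × Int × Int) : Prop := out = occuranceDigit_alt No
instance (No : Int) (out : Int × Int × Int) : Decidable (Spec_occuranceDigit No out) := by unfold Spec_occuranceDigit; infer_instance

-- ===== CLAIM (what is proved, stated in full; the proofs are below) =====
def Claim_equal_occuranceDigit : Prop := ∀ (No : Int), Dom_occuranceDigit No → Pre_occuranceDigit No → Spec_occuranceDigit No (occuranceDigit No)

-- ===== LEMMAS AND PROOFS =====

-- str(n) for n ≥ 0, as a list of characters
def pvRep (n : Nat) : List Char :=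
  if n = 0 then ['0'] else ((Nat.digits 10 n).map Nat.digitChar).reverse

theorem pvToDigitsCore_eq (f : Nat) : ∀ (n : Nat) (acc : List Char), n < f →
    Nat.toDigitsCore 10 f n acc = pvRep n ++ acc := by
  induction f with
  | zero => intro n acc h; omega
  | succ f ih =>
    intro n acc h
    rw [Nat.toDigitsCore]
    by_cases h0 : n / 10 = 0
    · simp only [h0, if_true]
      rcases Nat.eq_zero_or_pos n with hn | hn
      · simp [pvRep, hn, Nat.digitChar]
      · have h10 : n < 10 := by omega
        rw [pvRep, if_neg (by omega), Nat.digits_def' (by norm_num) hn, h0]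
        simp [Nat.mod_eq_of_lt h10]
    · rw [if_neg h0, ih (n / 10) _ (by omega)]
      have hn : 0 < n := by by_contra h'; simp [Nat.eq_zero_of_not_pos h'] at h0
      rw [show pvRep n = ((Nat.digits 10 n).map Nat.digitChar).reverse from if_neg (by omega),
          Nat.digits_def' (by norm_num : 1 < 10) hn]
      rw [pvRep, if_neg h0]
      simp

theorem pvCount_rep (n : Nat) (d : Nat) (hd : d = 4 ∨ d = 5 ∨ d = 7) :
    (pvRep n).count (Nat.digitChar d) = (Nat.digits 10 n).count d := by
  rw [pvRep]
  by_cases h0 : n = 0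
  · subst h0; rcases hd with h | h | h <;> subst h <;> decide
  · rw [if_neg h0, List.count_reverse, List.count_eq_countP, List.count_eq_countP,
      List.countP_map]
    apply List.countP_congr
    intro x hx
    have hx10 : x < 10 := Nat.digits_lt_base (by norm_num) hx
    rcases hd with h | h | h <;> subst h <;> (interval_cases x <;> simp [Nat.digitChar])

theorem pvLoopA_eq (n : Nat) : ∀ c4 c5 c7 : Int,
    occuranceDigitLoop (n : Int) c4 c5 c7 =
      (c4 + ((Nat.digits 10 n).count 4 : Int),
       c5 + ((Nat.digits 10 n).count 5 : Int),
       c7 + ((Nat.digits 10 n).count 7 : Int)) := by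
  induction n using Nat.strong_induction_on with
  | _ n ih =>
    intro c4 c5 c7
    rcases Nat.eq_zero_or_pos n with hn | hn
    · subst hn; rw [occuranceDigitLoop]; simp
    · rw [occuranceDigitLoop, if_neg (by positivity),
        if_pos (by exact_mod_cast hn)]
      have hmod : PySem.Int.mod (n : Int) 10 = ((n % 10 : Nat) : Int) :=
        PySem.Int.mod_natCast n 10
      have hdiv : PySem.Int.floordiv (n : Int) 10 = ((n / 10 : Nat) : Int) :=
        PySem.Int.floordiv_natCast n 10
      have hrec : n / 10 < n := Nat.div_lt_self hn (by norm_num)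
      have hdig : Nat.digits 10 n = n % 10 :: Nat.digits 10 (n / 10) :=
        Nat.digits_def' (by norm_num) hn
      simp only [hmod, hdiv, hdig, List.count_cons]
      by_cases h4 : (n % 10) = 4
      · rw [if_pos (by exact_mod_cast h4), ih _ hrec]
        simp [h4]; ring_nf
      · rw [if_neg (by exact_mod_cast h4)]
        by_cases h5 : (n % 10) = 5
        · rw [if_pos (by exact_mod_cast h5), ih _ hrec]
          simp [h5]; ring_nf
        · rw [if_neg (by exact_mod_cast h5)]
          by_cases h7 : (n % 10) = 7
          · rw [if_pos (by exact_mod_cast h7), ih _ hrec]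
            simp [h7]; ring_nf
          · rw [if_neg (by exact_mod_cast h7), ih _ hrec]
            simp [h4, h5, h7]

theorem pvAlt_eq (n : Nat) :
    occuranceDigit_alt (n : Int) =
      (((pvRep n).count '4' : Int), ((pvRep n).count '5' : Int), ((pvRep n).count '7' : Int)) := by
  have htoChars : PySem.Int.toChars (n : Int) = pvRep n := by
    rw [PySem.Int.toChars, if_neg (by exact_mod_cast Int.not_lt.mpr (Int.natCast_nonneg n))]
    have : ((n : Int)).toNat = n := Int.toNat_natCast n
    rw [this, Nat.toDigits, pvToDigitsCore_eq (n + 1) n [] (by omega), List.append_nil]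
  rw [occuranceDigit_alt]
  simp only [PySem.Int.toList_toStr, htoChars,
    PySem.Dict.getD_foldl_insert_add_one]
  have hempty : ∀ c : Char, (PySem.Dict.empty : PySem.Dict Char Int).getD c 0 = 0 := fun _ => rfl
  simp [hempty]

-- ===== VERDICT (by name: the statement is the Claim_ definition above) =====
theorem occuranceDigit_spec : Claim_equal_occuranceDigit := by
  intro No _ hpre
  unfold Spec_occuranceDigit occuranceDigit
  obtain ⟨n, rfl⟩ : ∃ n : Nat, No = (n : Int) := ⟨No.toNat, (Int.toNat_of_nonneg hpre).symm⟩
  rw [pvLoopA_eq, pvAlt_eq]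
  have h4 : Nat.digitChar 4 = '4' := rfl
  have h5 : Nat.digitChar 5 = '5' := rfl
  have h7 : Nat.digitChar 7 = '7' := rfl
  rw [← h4, ← h5, ← h7, pvCount_rep n 4 (by tauto), pvCount_rep n 5 (by tauto),
    pvCount_rep n 7 (by tauto)]
  simp
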